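-- pv_equiv track=rewrite | github.com/gabrielxmit10/OTM_Vocabulary_Learning | OTM_Trabalho/program_folder/creating_expression.py | simplify_or
-- ===== SOURCE A (Python) =====
-- def simplify_or(tokens):
--     """
--     tokens: list[str] representing one big expression like:
--         ["Or", "(", "l[35][1]", ",", "Eq(x[10],2)", ",", ... , ")"]
--     Returns a simplified token list.
--     """
--
--     # ----------------------------------------------------------
--     # 1. PARSER — very small recursive parser for this structure
--     # ----------------------------------------------------------
--
--     def parse_expr(i):
--         token = tokens[i]
--
--         # Case 1: operation: Or(...) or And(...)
--         if token in ("Or", "And"):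
--             op = token
--             assert tokens[i+1] == "("
--             i += 2  # jump over 'Op ('
--
--             args = []
--             while True:
--                 # parse argument
--                 arg, i = parse_expr(i)
--                 args.append(arg)
--
--                 if tokens[i] == ",":
--                     i += 1
--                     continue
--                 elif tokens[i] == ")":
--                     i += 1
--                     break
--                 else:
--                     raise ValueError(f"Unexpected token {tokens[i]} while parsing {op}")
--
--             return (op, args), i
--
--         # Case 2: atomic token: l[35][1], Eq(x,2), etc.
--         else:
--             return token, i + 1
--
--     # ----------------------------------------------------------
--     # 2. SERIALISER — turns AST back into token vector
--     # ----------------------------------------------------------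
--
--     def to_tokens(expr):
--         if isinstance(expr, tuple):
--             op, args = expr
--             out = [op, "("]
--             for k, a in enumerate(args):
--                 out.extend(to_tokens(a))
--                 if k < len(args) - 1:
--                     out.append(",")
--             out.append(")")
--             return out
--         else:
--             return [expr]
--
--     # ----------------------------------------------------------
--     # 3. SIMPLIFICATION
--     # ----------------------------------------------------------
--
--     def simplify(expr):
--         if not isinstance(expr, tuple):
--             return expr  # atomic
--
--         op, args = expr
--         args = [simplify(a) for a in args]
--
--         if op == "Or":
--             # collect top-level atoms of Or
--             top_atoms = set()
--             for a in args:
--                 if not isinstance(a, tuple):  # atomic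
--                     top_atoms.add(a)
--
--             new_args = []
--             for a in args:
--                 if isinstance(a, tuple) and a[0] == "And":
--                     # If any argument of this And is in top_atoms: remove the And entirely
--                     and_args = a[1]
--                     if any((not isinstance(x, tuple) and x in top_atoms) for x in and_args):
--                         continue  # skip whole And
--                 new_args.append(a)
--
--             return ("Or", new_args)
--
--         return (op, args)
--
--     # ----------------------------------------------------------
--     # Apply all stages
--     # ----------------------------------------------------------
--
--     ast, pos = parse_expr(0)
--     if pos != len(tokens):
--         raise ValueError("Parsing ended early, malformed token stream")
--
--     ast = simplify(ast)
--     return to_tokens(ast)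
-- ===== SOURCE B (Python) =====
-- def simplify_or(tokens):
--     """
--     Single-pass explicit-stack parser: scans the tokens once, keeping a stack
--     of (op, already-simplified-args) frames; when a frame is closed by ')' the
--     Or-simplification is applied on the spot, so no separate recursive
--     simplify pass over the AST is needed.  The simplified AST is then
--     serialised first-arg/rest-args style.
--     """
--     n = len(tokens)
--     i = 0
--     stack = []          # frames: [op, list of already-simplified argument nodes]
--     result = None
--     done = False
--     while not done:
--         t = tokens[i]
--         if t in ("Or", "And"):
--             if tokens[i + 1] != "(":
--                 raise ValueError(f"expected '(' after {t}")
--             stack.append((t, []))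
--             i += 2
--             continue
--         # atom: a complete expression; attach it and close any finished frames
--         node = t
--         i += 1
--         while True:
--             if not stack:
--                 result = node
--                 done = True
--                 break
--             sep = tokens[i]
--             if sep == ",":
--                 stack[-1][1].append(node)
--                 i += 1
--                 break
--             elif sep == ")":
--                 op, args = stack.pop()
--                 args.append(node)
--                 node = _finish(op, args)
--                 i += 1
--             else:
--                 raise ValueError(f"unexpected token {sep}")
--     if i != n:
--         raise ValueError("trailing tokens after expression")
--     return _serialize(result)
--
--
-- def _finish(op, args):
--     # build a node; simplify Or on the fly (args are already simplified)
--     if op == "Or":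
--         atoms = {a for a in args if not isinstance(a, tuple)}
--         args = [a for a in args
--                 if not (isinstance(a, tuple) and a[0] == "And"
--                         and any(not isinstance(x, tuple) and x in atoms
--                                 for x in a[1]))]
--     return (op, args)
--
--
-- def _serialize(e):
--     if not isinstance(e, tuple):
--         return [e]
--     op, args = e
--     out = [op, "("]
--     if args:
--         out += _serialize(args[0])
--         for a in args[1:]:
--             out.append(",")
--             out += _serialize(a)
--     out.append(")")
--     return out
-- ===== Notes on version B (the rewrite author's own statement) =====
-- stated objective: alternative
-- what changed: The recursive-descent parser plus separate recursive simplify pass is replaced by a single left-to-right scan with an explicit stack of (op,args) frames that applies the Or-simplification at the moment each frame is popped, and the serializer emits first-argument/comma-rest instead of counting indices.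
import Mathlib
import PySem

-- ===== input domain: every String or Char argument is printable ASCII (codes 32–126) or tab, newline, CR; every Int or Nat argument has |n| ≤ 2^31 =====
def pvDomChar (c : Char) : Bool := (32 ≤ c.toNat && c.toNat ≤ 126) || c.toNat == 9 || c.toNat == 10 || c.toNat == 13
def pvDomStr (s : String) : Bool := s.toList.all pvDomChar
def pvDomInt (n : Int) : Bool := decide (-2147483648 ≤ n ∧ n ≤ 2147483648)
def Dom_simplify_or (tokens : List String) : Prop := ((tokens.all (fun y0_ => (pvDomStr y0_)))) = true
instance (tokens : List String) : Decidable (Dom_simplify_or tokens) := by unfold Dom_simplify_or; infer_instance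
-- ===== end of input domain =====

-- B re-implements A with an explicit-stack single-pass parser that simplifies Or-frames as they
-- are popped (instead of recursive descent plus a separate recursive simplify pass); same results.

-- Shared AST type (Python's nested tuples/strings); mutual pair instead of a nested inductive.
mutual
inductive PExpr : Type where
  | atom : String → PExpr
  | node : String → PExprList → PExpr
inductive PExprList : Type where
  | nil : PExprList
  | cons : PExpr → PExprList → PExprList
end

def PExprList.snoc : PExprList → PExpr → PExprList
  | .nil, e => .cons e .nil
  | .cons a as, e => .cons a (as.snoc e)

def PExprList.ofList : List PExpr → PExprList
  | [] => .nil
  | a :: as => .cons a (PExprList.ofList as)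

def PExprList.length : PExprList → Nat
  | .nil => 0
  | .cons _ as => as.length + 1

-- ===== PORT A =====
-- parse_expr / its inner while loop (fuel is only a totality guard; 2*len+1 is always enough)
mutual
def parseA (tokens : List String) : Nat → Nat → Option (PExpr × Nat)
  | 0, _ => none
  | f + 1, i =>
    match PySem.List.pyGet? tokens ((i : Nat) : Int) with
    | none => none                                     -- IndexError
    | some t =>
      if t = "Or" ∨ t = "And" then
        match PySem.List.pyGet? tokens ((i + 1 : Nat) : Int) with
        | none => none                                 -- IndexError
        | some s =>
          if s = "(" then parseArgsA tokens f t (i + 2) PExprList.nil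
          else none                                    -- AssertionError
      else some (PExpr.atom t, i + 1)
def parseArgsA (tokens : List String) : Nat → String → Nat → PExprList → Option (PExpr × Nat)
  | 0, _, _, _ => none
  | f + 1, op, i, acc =>
    match parseA tokens f i with
    | none => none
    | some (a, i') =>
      match PySem.List.pyGet? tokens ((i' : Nat) : Int) with
      | none => none                                   -- IndexError
      | some s =>
        if s = "," then parseArgsA tokens f op (i' + 1) (acc.snoc a)
        else if s = ")" then some (PExpr.node op (acc.snoc a), i' + 1)
        else none                                      -- ValueError "Unexpected token"
end

-- simplify: top_atoms set built by a loop of .add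
def topAtomsA : PExprList → PySem.Set String → PySem.Set String
  | .nil, s => s
  | .cons (.atom t) as, s => topAtomsA as (PySem.Set.add s t)
  | .cons (.node _ _) as, s => topAtomsA as s

def anyAtomInA : PExprList → PySem.Set String → Bool
  | .nil, _ => false
  | .cons (.atom t) as, s => PySem.Set.contains s t || anyAtomInA as s
  | .cons (.node _ _) as, s => anyAtomInA as s

def filterOrA : PExprList → PySem.Set String → PExprList
  | .nil, _ => .nil
  | .cons (PExpr.node op cs) as, tops =>
    if op = "And" then
      if anyAtomInA cs tops then filterOrA as tops
      else .cons (PExpr.node op cs) (filterOrA as tops)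
    else .cons (PExpr.node op cs) (filterOrA as tops)
  | .cons (PExpr.atom t) as, tops => .cons (PExpr.atom t) (filterOrA as tops)

mutual
def simplifyA : PExpr → PExpr
  | .atom t => .atom t
  | .node op args =>
    let args' := simplifyListA args
    if op = "Or" then
      PExpr.node "Or" (filterOrA args' (topAtomsA args' PySem.Set.empty))
    else PExpr.node op args'
def simplifyListA : PExprList → PExprList
  | .nil => .nil
  | .cons a as => .cons (simplifyA a) (simplifyListA as)
end

-- to_tokens: enumerate loop with "k < len(args) - 1" comma rule
mutual
def to_tokensA : PExpr → List String
  | .atom t => [t]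
  | .node op args => [op, "("] ++ to_tokensArgsA args 0 args.length ++ [")"]
def to_tokensArgsA : PExprList → Nat → Nat → List String
  | .nil, _, _ => []
  | .cons a as, k, n => to_tokensA a ++ (if k < n - 1 then [","] else []) ++ to_tokensArgsA as (k + 1) n
end

def simplify_or (tokens : List String) : List String :=
  match parseA tokens (2 * tokens.length + 1) 0 with
  | none => []                                         -- Python raises here (outside Pre_)
  | some (e, pos) =>
    if pos = tokens.length then to_tokensA (simplifyA e)
    else []                                            -- ValueError "Parsing ended early" (outside Pre_)

-- ===== PORT B =====
def anyAtomB : PExprList → PySem.Set String → Bool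
  | .nil, _ => false
  | .cons a as, s =>
    (match a with | .atom t => PySem.Set.contains s t | .node _ _ => false) || anyAtomB as s

def finishB (op : String) (args : List PExpr) : PExpr :=
  if op = "Or" then
    let atoms := PySem.Set.ofList (args.filterMap fun a =>
      match a with | .atom t => some t | .node _ _ => none)
    PExpr.node op (PExprList.ofList (args.filter fun a =>
      !(match a with | .node op' cs => op' == "And" && anyAtomB cs atoms | .atom _ => false)))
  else PExpr.node op (PExprList.ofList args)

-- the explicit-stack scan: runB expects an expression, closeB attaches a finished node
mutual
def runB : List String → List (String × List PExpr) → Option (PExpr × List String)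
  | [], _ => none                                      -- IndexError
  | t :: rest, stack =>
    if t = "Or" ∨ t = "And" then
      match rest with
      | [] => none                                     -- IndexError
      | s :: rest' => if s = "(" then runB rest' ((t, []) :: stack) else none
    else closeB (PExpr.atom t) rest stack
  termination_by rest _ => rest.length
def closeB : PExpr → List String → List (String × List PExpr) → Option (PExpr × List String)
  | e, rest, [] => some (e, rest)
  | e, rest, (op, args) :: stack =>
    match rest with
    | [] => none                                       -- IndexError
    | sep :: rest' =>
      if sep = "," then runB rest' ((op, args ++ [e]) :: stack)
      else if sep = ")" then closeB (finishB op (args ++ [e])) rest' stack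
      else none                                        -- ValueError
  termination_by _ rest _ => rest.length
end

mutual
def serializeB : PExpr → List String
  | .atom t => [t]
  | .node op args => [op, "("] ++ serializeArgsB args ++ [")"]
def serializeArgsB : PExprList → List String
  | .nil => []
  | .cons a as => serializeB a ++ serializeRestB as
def serializeRestB : PExprList → List String
  | .nil => []
  | .cons a as => "," :: (serializeB a ++ serializeRestB as)
end

def simplify_or_alt (tokens : List String) : List String :=
  match runB tokens [] with
  | none => []
  | some (e, rest) => if rest = [] then serializeB e else []

-- ===== PRECONDITION & SPEC =====
-- Pre_: the token stream is one well-formed expression of the grammar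
--   expr := atom | ("Or"|"And") "(" expr ("," expr)* ")"      (atom = any other token)
-- i.e. grammar membership, checked by a counter automaton over the tokens (expect : an
-- expression is expected next / otherwise one just ended; d = nesting depth) — a shape
-- condition on the input, building no AST and computing no output.  Exactly the inputs on
-- which A returns normally; elsewhere A raises (IndexError / AssertionError / ValueError).
-- (The ports are in fact proved equal on ALL inputs — ports_eq below — so the claim does not
-- depend on which inputs Pre_ admits.)
def pvScan : List String → Bool → Nat → Bool
  | [], true, _ => false
  | t :: rest, true, d =>
    if t = "Or" ∨ t = "And" then
      match rest with
      | [] => false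
      | s :: rest' => if s = "(" then pvScan rest' true (d + 1) else false
    else pvScan rest false d
  | rest, false, 0 => rest.isEmpty
  | [], false, _ + 1 => false
  | t :: rest, false, d + 1 =>
    if t = "," then pvScan rest true (d + 1)
    else if t = ")" then pvScan rest false d
    else false

def Pre_simplify_or (tokens : List String) : Prop := pvScan tokens true 0 = true
instance (tokens : List String) : Decidable (Pre_simplify_or tokens) := by
  unfold Pre_simplify_or; infer_instance

def pvWitness_simplify_or : List String :=
  ["Or", "(", "x", ",", "And", "(", "x", ",", "y", ")", ")"]

def Spec_simplify_or (tokens : List String) (out : List String) : Prop := out = simplify_or_alt tokens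
instance (tokens : List String) (out : List String) : Decidable (Spec_simplify_or tokens out) := by
  unfold Spec_simplify_or; infer_instance

-- ===== CLAIM (what is proved, stated in full; the proofs are below) =====
def Claim_equal_simplify_or : Prop :=
  ∀ (tokens : List String), Dom_simplify_or tokens → Pre_simplify_or tokens →
    Spec_simplify_or tokens (simplify_or tokens)

-- ===== LEMMAS AND PROOFS =====

def PExprList.toList : PExprList → List PExpr
  | .nil => []
  | .cons a as => a :: as.toList

theorem toList_snoc : ∀ (as : PExprList) (e : PExpr),
    (as.snoc e).toList = as.toList ++ [e]
  | .nil, _ => rfl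
  | .cons a as, e => by simp [PExprList.snoc, PExprList.toList, toList_snoc as e]

theorem ofList_toList : ∀ as : PExprList, PExprList.ofList as.toList = as
  | .nil => rfl
  | .cons a as => by simp [PExprList.toList, PExprList.ofList, ofList_toList as]

theorem simplifyListA_snoc : ∀ (as : PExprList) (e : PExpr),
    simplifyListA (as.snoc e) = (simplifyListA as).snoc (simplifyA e)
  | .nil, _ => rfl
  | .cons a as, e => by simp [PExprList.snoc, simplifyListA, simplifyListA_snoc as e]

theorem anyAtom_eq : ∀ (cs : PExprList) (s : PySem.Set String),
    anyAtomInA cs s = anyAtomB cs s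
  | .nil, _ => rfl
  | .cons (.atom t) as, s => by simp [anyAtomInA, anyAtomB, anyAtom_eq as s]
  | .cons (.node op cs') as, s => by simp [anyAtomInA, anyAtomB, anyAtom_eq as s]

theorem topAtomsA_eq : ∀ (cs : PExprList) (s : PySem.Set String),
    topAtomsA cs s =
      (cs.toList.filterMap fun a =>
        match a with | .atom t => some t | .node _ _ => none).foldl PySem.Set.add s
  | .nil, _ => rfl
  | .cons (.atom t) as, s => by
      simp [topAtomsA, PExprList.toList, topAtomsA_eq as (PySem.Set.add s t)]
  | .cons (.node op cs') as, s => by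
      simp [topAtomsA, PExprList.toList, topAtomsA_eq as s]

theorem filterOrA_eq : ∀ (cs : PExprList) (tops : PySem.Set String),
    filterOrA cs tops =
      PExprList.ofList (cs.toList.filter fun a =>
        !(match a with | .node op' cs' => op' == "And" && anyAtomB cs' tops | .atom _ => false))
  | .nil, _ => rfl
  | .cons (.atom t) as, tops => by
      simp [filterOrA, PExprList.toList, PExprList.ofList, filterOrA_eq as tops]
  | .cons (.node op cs') as, tops => by
      by_cases hop : op = "And"
      · subst hop
        by_cases hany : anyAtomInA cs' tops
        · simp [filterOrA, hany, PExprList.toList, filterOrA_eq as tops,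
                anyAtom_eq cs' tops ▸ hany]
        · simp [filterOrA, hany, PExprList.toList, PExprList.ofList, filterOrA_eq as tops,
                anyAtom_eq cs' tops ▸ hany]
      · simp [filterOrA, hop, PExprList.toList, PExprList.ofList, filterOrA_eq as tops]

-- bottom-up fusion: simplifying a node = finishB applied to the simplified children
theorem simplify_node_eq_finish (op : String) (cs : PExprList) :
    simplifyA (PExpr.node op cs) = finishB op (simplifyListA cs).toList := by
  by_cases hop : op = "Or"
  · subst hop
    simp only [simplifyA, finishB]
    rw [filterOrA_eq, topAtomsA_eq]
    rfl
  · simp [simplifyA, finishB, hop, ofList_toList]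

-- serializers agree
mutual
theorem tokA_eq : ∀ e : PExpr, to_tokensA e = serializeB e
  | .atom t => rfl
  | .node op args => by
      simp [to_tokensA, serializeB, tokArgsA_eq args 0 args.length (by simp)]
theorem tokArgsA_eq : ∀ (as : PExprList) (k n : Nat), n = k + as.length →
    to_tokensArgsA as k n = serializeArgsB as
  | .nil, _, _, _ => rfl
  | .cons a .nil, k, n, h => by
      have hk : ¬ k < n - 1 := by simp [PExprList.length] at h; omega
      simp [to_tokensArgsA, serializeArgsB, serializeRestB, hk, tokA_eq a]
  | .cons a (.cons b bs), k, n, h => by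
      have hk : k < n - 1 := by simp [PExprList.length] at h; omega
      have ih := tokArgsA_eq (.cons b bs) (k + 1) n (by simp [PExprList.length] at h ⊢; omega)
      simp [to_tokensArgsA, serializeArgsB, serializeRestB, hk, tokA_eq a] at ih ⊢
      simp [ih]
end

theorem drop_cons_of_getElem? {α : Type} {xs : List α} {i : Nat} {t : α}
    (h : xs[i]? = some t) : xs.drop i = t :: xs.drop (i + 1) := by
  obtain ⟨hlt, he⟩ := List.getElem?_eq_some_iff.1 h
  rw [List.drop_eq_getElem_cons hlt, he]

-- parser progress: a successful parse consumes at least one token and stays in range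
theorem parse_progress (tokens : List String) :
    ∀ f : Nat,
      (∀ i e j, parseA tokens f i = some (e, j) → i < j ∧ j ≤ tokens.length) ∧
      (∀ op i acc e j, parseArgsA tokens f op i acc = some (e, j) → i < j ∧ j ≤ tokens.length) := by
  intro f
  induction f with
  | zero =>
    exact ⟨fun i e j h => by simp [parseA] at h, fun op i acc e j h => by simp [parseArgsA] at h⟩
  | succ f ih =>
    obtain ⟨ihA, ihArgs⟩ := ih
    constructor
    · intro i e j h
      simp only [parseA, PySem.List.pyGet?_natCast] at h
      rcases hg : tokens[i]? with _ | t <;> rw [hg] at h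
      · simp at h
      · have hi : i < tokens.length := (List.getElem?_eq_some_iff.1 hg).1
        dsimp only at h
        split_ifs at h with hop
        · rcases hg2 : tokens[i + 1]? with _ | s <;> rw [hg2] at h
          · simp at h
          · dsimp only at h
            split_ifs at h with hs
            · have := ihArgs t (i + 2) PExprList.nil e j h
              omega
        · simp only [Option.some.injEq, Prod.mk.injEq] at h
          obtain ⟨-, rfl⟩ := h
          omega
    · intro op i acc e j h
      simp only [parseArgsA] at h
      rcases hp : parseA tokens f i with _ | ⟨a, i'⟩ <;> rw [hp] at h
      · simp at h
      · have h1 := ihA i a i' hp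
        dsimp only at h
        rcases hg : tokens[i']? with _ | s <;> rw [PySem.List.pyGet?_natCast, hg] at h
        · simp at h
        · have hi' : i' < tokens.length := (List.getElem?_eq_some_iff.1 hg).1
          dsimp only at h
          split_ifs at h with hs hs2
          · have := ihArgs op (i' + 1) (acc.snoc a) e j h
            omega
          · simp only [Option.some.injEq, Prod.mk.injEq] at h
            obtain ⟨-, rfl⟩ := h
            omega

-- the stack machine is the defunctionalised recursive-descent parser with simplify fused in
theorem machine_eq (tokens : List String) :
    ∀ f : Nat,
      (∀ i stack, 2 * (tokens.length - i) + 1 ≤ f →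
        runB (tokens.drop i) stack =
          (match parseA tokens f i with
           | some (e, j) => closeB (simplifyA e) (tokens.drop j) stack
           | none => none)) ∧
      (∀ op i acc stack, 2 * (tokens.length - i) + 2 ≤ f →
        runB (tokens.drop i) ((op, (simplifyListA acc).toList) :: stack) =
          (match parseArgsA tokens f op i acc with
           | some (e, j) => closeB (simplifyA e) (tokens.drop j) stack
           | none => none)) := by
  intro f
  induction f with
  | zero =>
    exact ⟨fun i stack hb => by omega, fun op i acc stack hb => by omega⟩
  | succ f ih =>
    obtain ⟨ihA, ihArgs⟩ := ih
    constructor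
    · intro i stack hb
      simp only [parseA, PySem.List.pyGet?_natCast]
      rcases hg : tokens[i]? with _ | t
      · have hlen : tokens.length ≤ i := List.getElem?_eq_none_iff.1 hg
        rw [List.drop_eq_nil_iff.2 hlen, runB.eq_def]
      · have hi : i < tokens.length := (List.getElem?_eq_some_iff.1 hg).1
        rw [drop_cons_of_getElem? hg]
        dsimp only
        by_cases hop : t = "Or" ∨ t = "And"
        · rw [if_pos hop]
          rcases hg2 : tokens[i + 1]? with _ | s
          · have hlen2 : tokens.length ≤ i + 1 := List.getElem?_eq_none_iff.1 hg2
            rw [List.drop_eq_nil_iff.2 hlen2, runB.eq_def]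
            simp [hop]
          · have hi2 : i + 1 < tokens.length := (List.getElem?_eq_some_iff.1 hg2).1
            rw [drop_cons_of_getElem? hg2]
            dsimp only
            by_cases hs : s = "("
            · subst hs
              rw [if_pos rfl]
              have harg := ihArgs t (i + 2) PExprList.nil stack (by omega)
              rw [runB.eq_def]
              simpa [hop, simplifyListA, PExprList.toList] using harg
            · rw [if_neg hs, runB.eq_def]
              simp [hop, hs]
        · rw [if_neg hop, runB.eq_def]
          simp [hop, simplifyA]
    · intro op i acc stack hb
      simp only [parseArgsA]
      have hA := ihA i ((op, (simplifyListA acc).toList) :: stack) (by omega)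
      rw [hA]
      rcases hp : parseA tokens f i with _ | ⟨a, i'⟩
      · simp
      · obtain ⟨hlt, hle⟩ := (parse_progress tokens f).1 i a i' hp
        dsimp only
        rw [PySem.List.pyGet?_natCast]
        rcases hg : tokens[i']? with _ | sep
        · have hlen : tokens.length ≤ i' := List.getElem?_eq_none_iff.1 hg
          rw [List.drop_eq_nil_iff.2 hlen, closeB.eq_def]
        · have hi' : i' < tokens.length := (List.getElem?_eq_some_iff.1 hg).1
          rw [drop_cons_of_getElem? hg]
          dsimp only
          by_cases hsep : sep = ","
          · subst hsep
            rw [if_pos rfl]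
            have harg := ihArgs op (i' + 1) (acc.snoc a) stack (by omega)
            rw [simplifyListA_snoc, toList_snoc] at harg
            rw [closeB.eq_def]
            simpa using harg
          · by_cases hsep2 : sep = ")"
            · subst hsep2
              rw [if_neg hsep, if_pos rfl, closeB.eq_def]
              simp [hsep, simplify_node_eq_finish, simplifyListA_snoc, toList_snoc]
            · rw [if_neg hsep, if_neg hsep2, closeB.eq_def]
              simp [hsep, hsep2]

theorem ports_eq (tokens : List String) : simplify_or tokens = simplify_or_alt tokens := by
  unfold simplify_or simplify_or_alt
  have h := (machine_eq tokens (2 * tokens.length + 1)).1 0 [] (by omega)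
  rw [List.drop_zero] at h
  rw [h]
  rcases hp : parseA tokens (2 * tokens.length + 1) 0 with _ | ⟨e, j⟩
  · rfl
  · obtain ⟨-, hle⟩ := (parse_progress tokens (2 * tokens.length + 1)).1 0 e j hp
    simp only [closeB]
    by_cases hj : j = tokens.length
    · subst hj
      simp [List.drop_eq_nil_of_le (le_refl _), tokA_eq]
    · have : tokens.drop j ≠ [] := by
        intro hnil
        exact hj (le_antisymm hle (List.drop_eq_nil_iff.1 hnil))
      simp [hj, this]

-- ===== VERDICT (by name: the statement is the Claim_ definition above) =====
theorem simplify_or_spec : Claim_equal_simplify_or := by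
  intro tokens _ _
  unfold Spec_simplify_or
  exact ports_eq tokens
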